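-- pv_equiv track=rewrite | github.com/mohamedOharoun/AP | week-5/c5.py | check
-- ===== SOURCE A (Python) =====
-- def check(c):
--     if len(c) != len(set(c)):
--         return False
--     for i, x in enumerate(c):
--         for j in range(i+1, len(c)):
--             if x+i == j+c[j] or x-i == c[j] - j:
--                 return False
--     return True
-- ===== SOURCE B (Python) =====
-- def check(c):
--     vals, sums, diffs = set(), set(), set()
--     for i, x in enumerate(c):
--         if x in vals or x + i in sums or x - i in diffs:
--             return False
--         vals.add(x)
--         sums.add(x + i)
--         diffs.add(x - i)
--     return True
-- ===== Notes on version B (the rewrite author's own statement) =====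
-- stated objective: faster
-- what changed: Replaced the duplicate pre-check plus the quadratic pairwise scan over (i,j) with a single pass that keeps three hash sets of seen values, seen x+i sums and seen x-i differences, returning False on the first collision.
import Mathlib
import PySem

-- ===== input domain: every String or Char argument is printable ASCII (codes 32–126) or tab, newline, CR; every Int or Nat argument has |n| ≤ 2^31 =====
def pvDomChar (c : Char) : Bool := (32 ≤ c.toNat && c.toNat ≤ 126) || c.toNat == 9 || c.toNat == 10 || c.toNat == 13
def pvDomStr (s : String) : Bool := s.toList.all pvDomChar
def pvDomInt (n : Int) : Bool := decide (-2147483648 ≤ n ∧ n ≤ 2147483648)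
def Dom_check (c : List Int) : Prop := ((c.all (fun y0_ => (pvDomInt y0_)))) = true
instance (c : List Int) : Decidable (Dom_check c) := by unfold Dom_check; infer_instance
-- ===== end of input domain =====

-- B replaces A's duplicate pre-check plus quadratic pairwise diagonal scan by one O(n) pass
-- tracking three sets of seen values / sums x+i / differences x-i (objective: faster).

-- ===== PORT A =====
def check (c : List Int) : Bool :=
  -- if len(c) != len(set(c)): return False
  if (c.length : Int) ≠ ((PySem.Set.ofList c).length : Int) then false
  -- for i, x in enumerate(c): for j in range(i+1, len(c)): if …: return False
  else if (PySem.List.enumerate c 0).any (fun p =>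
      (PySem.List.pyRange (p.1 + 1) (c.length : Int) 1).any (fun j =>
        match PySem.List.pyGet? c j with   -- c[j]; j is always in range here
        | some cj => (p.2 + p.1 == j + cj) || (p.2 - p.1 == cj - j)
        | none => false))
  then false else true

-- ===== PORT B =====
-- the loop of Source B: index i, the three seen-sets as state, early return False on a collision
def checkAltGo : List Int → Int → PySem.Set Int → PySem.Set Int → PySem.Set Int → Bool
  | [], _, _, _, _ => true
  | x :: rest, i, vals, sums, diffs =>
    if vals.contains x || sums.contains (x + i) || diffs.contains (x - i) then false
    else checkAltGo rest (i + 1) (vals.add x) (sums.add (x + i)) (diffs.add (x - i))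

def check_alt (c : List Int) : Bool :=
  checkAltGo c 0 PySem.Set.empty PySem.Set.empty PySem.Set.empty

-- ===== PRECONDITION & SPEC =====
def Spec_check (c : List Int) (out : Bool) : Prop := out = check_alt c
instance (c : List Int) (out : Bool) : Decidable (Spec_check c out) := by unfold Spec_check; infer_instance

-- ===== CLAIM (what is proved, stated in full; the proofs are below) =====
def Claim_equal_check : Prop := ∀ (c : List Int), Dom_check c → Spec_check c (check c)

-- ===== LEMMAS AND PROOFS =====

-- the common characterisation: all values, all sums x+i and all differences x-i pairwise distinct
def pvQ (xs : List Int) : Prop :=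
  ∀ (k1 k2 : Nat) (h1 : k1 < xs.length) (h2 : k2 < xs.length), k1 < k2 →
    xs[k1] ≠ xs[k2] ∧ xs[k1] + (k1 : Int) ≠ xs[k2] + (k2 : Int) ∧ xs[k1] - (k1 : Int) ≠ xs[k2] - (k2 : Int)

lemma length_ofList_eq_iff (xs : List Int) :
    ((PySem.Set.ofList xs).length = xs.length) ↔ xs.Nodup := by
  constructor
  · intro h
    induction xs with
    | nil => simp
    | cons x xs ih =>
      rw [PySem.Set.ofList_cons] at h
      simp only [List.length_cons] at h
      have hle := PySem.Set.length_ofList_le xs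
      have hdle : ((PySem.Set.ofList xs).discard x).length ≤ (PySem.Set.ofList xs).length := by
        simp [PySem.Set.discard, List.length_filter_le]
      have hx : x ∉ xs := by
        intro hx
        have hxm : x ∈ PySem.Set.ofList xs := (PySem.Set.mem_ofList xs x).mpr hx
        have : ((PySem.Set.ofList xs).discard x).length < (PySem.Set.ofList xs).length := by
          simp only [PySem.Set.discard]
          exact List.length_filter_lt_length_iff_exists.mpr ⟨x, hxm, by simp⟩
        omega
      have hde : ((PySem.Set.ofList xs).discard x) = PySem.Set.ofList xs := by
        simp only [PySem.Set.discard]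
        apply List.filter_eq_self.mpr
        intro a ha
        have : a ∈ xs := (PySem.Set.mem_ofList xs a).mp ha
        simp only [Bool.not_eq_eq_eq_not, Bool.not_true, beq_eq_false_iff_ne]
        rintro rfl; exact hx this
      rw [hde] at h
      exact List.nodup_cons.mpr ⟨hx, ih (by omega)⟩
  · intro h
    rw [PySem.Set.ofList_eq_self_of_nodup xs h]

lemma check_iff (xs : List Int) : check xs = true ↔ pvQ xs := by
  unfold check
  split_ifs with hlen hany
  · -- lengths differ: not Nodup, pvQ fails on a duplicated pair
    simp only [false_iff]
    intro hQ
    apply hlen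
    have hnd : xs.Nodup :=
      List.pairwise_iff_getElem.mpr (fun i j hi hj hlt => (hQ i j hi hj hlt).1)
    have := (length_ofList_eq_iff xs).mpr hnd
    omega
  · -- some pair violates: pvQ fails
    simp only [false_iff]
    rw [List.any_eq_true] at hany
    obtain ⟨p, hp, hinner⟩ := hany
    rw [PySem.List.mem_enumerate_iff] at hp
    obtain ⟨k1, hk1, rfl⟩ := hp
    rw [List.any_eq_true] at hinner
    obtain ⟨j, hj, hcond⟩ := hinner
    rw [PySem.List.mem_pyRange_one] at hj
    simp only [zero_add] at hj hcond
    have hj0 : 0 ≤ j := by omega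
    obtain ⟨k2, rfl⟩ := Int.eq_ofNat_of_zero_le hj0
    have hk2 : k2 < xs.length := by exact_mod_cast hj.2
    rw [PySem.List.pyGet?_natCast, List.getElem?_eq_getElem hk2] at hcond
    simp only [beq_iff_eq, Bool.or_eq_true] at hcond
    intro hQ
    have hlt : k1 < k2 := by exact_mod_cast hj.1
    obtain ⟨_, hs, hd⟩ := hQ k1 k2 hk1 hk2 hlt
    rcases hcond with h | h
    · exact hs (by omega)
    · exact hd (by omega)
  · -- lengths equal and no violating pair: pvQ holds
    simp only [true_iff]
    intro k1 k2 hk1 hk2 hlt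
    have hnd : xs.Nodup := (length_ofList_eq_iff xs).mp (by omega)
    refine ⟨?_, ?_, ?_⟩
    · intro heq
      exact absurd ((List.Nodup.getElem_inj_iff hnd).mp heq) (by omega)
    · intro heq
      apply hany
      rw [List.any_eq_true]
      refine ⟨((k1 : Int), xs[k1]), ?_, ?_⟩
      · rw [PySem.List.mem_enumerate_iff]; exact ⟨k1, hk1, by simp⟩
      · rw [List.any_eq_true]
        refine ⟨(k2 : Int), ?_, ?_⟩
        · rw [PySem.List.mem_pyRange_one]
          constructor <;> [skip; exact_mod_cast hk2]
          show ((k1 : Int), xs[k1]).1 + 1 ≤ (k2 : Int)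
          simp only []; omega
        · rw [PySem.List.pyGet?_natCast, List.getElem?_eq_getElem hk2]
          simp only [beq_iff_eq, Bool.or_eq_true]
          left; omega
    · intro heq
      apply hany
      rw [List.any_eq_true]
      refine ⟨((k1 : Int), xs[k1]), ?_, ?_⟩
      · rw [PySem.List.mem_enumerate_iff]; exact ⟨k1, hk1, by simp⟩
      · rw [List.any_eq_true]
        refine ⟨(k2 : Int), ?_, ?_⟩
        · rw [PySem.List.mem_pyRange_one]
          constructor <;> [skip; exact_mod_cast hk2]
          show ((k1 : Int), xs[k1]).1 + 1 ≤ (k2 : Int)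
          simp only []; omega
        · rw [PySem.List.pyGet?_natCast, List.getElem?_eq_getElem hk2]
          simp only [beq_iff_eq, Bool.or_eq_true]
          right; omega

lemma checkAltGo_iff (l : List Int) (i : Int) (vals sums diffs : PySem.Set Int) :
    checkAltGo l i vals sums diffs = true ↔
      ((∀ (k1 k2 : Nat) (h1 : k1 < l.length) (h2 : k2 < l.length), k1 < k2 →
          l[k1] ≠ l[k2] ∧ l[k1] + (i + k1) ≠ l[k2] + (i + k2) ∧ l[k1] - (i + k1) ≠ l[k2] - (i + k2))
       ∧ (∀ (k : Nat) (h : k < l.length),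
            l[k] ∉ vals ∧ (l[k] + (i + k)) ∉ sums ∧ (l[k] - (i + k)) ∉ diffs)) := by
  induction l generalizing i vals sums diffs with
  | nil => simp [checkAltGo]
  | cons x rest ih =>
    rw [checkAltGo]
    split_ifs with hc
    · -- collision with the sets: RHS fails at k = 0
      simp only [false_iff, not_and]
      intro _ hall
      have h0 := hall 0 (by simp)
      simp only [List.getElem_cons_zero, Nat.cast_zero, add_zero] at h0
      simp only [Bool.or_eq_true, PySem.Set.contains, List.contains_iff_mem] at hc
      rcases hc with (h | h) | h
      · exact h0.1 h
      · exact h0.2.1 h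
      · exact h0.2.2 h
    · rw [ih]
      simp only [Bool.or_eq_true, PySem.Set.contains, List.contains_iff_mem, not_or] at hc
      constructor
      · rintro ⟨hpair, hmem⟩
        constructor
        · intro k1 k2 h1 h2 hlt
          match k1, k2 with
          | 0, k2 + 1 =>
            have hm := hmem k2 (by simpa using h2)
            simp only [List.getElem_cons_zero, List.getElem_cons_succ, Nat.cast_zero, add_zero,
              Nat.cast_add, Nat.cast_one] at hm ⊢
            refine ⟨?_, ?_, ?_⟩
            · intro heq
              exact hm.1 ((PySem.Set.mem_add _ _ _).mpr (Or.inr heq.symm))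
            · intro heq
              apply hm.2.1
              simp [PySem.Set.mem_add]
              right; omega
            · intro heq
              apply hm.2.2
              simp [PySem.Set.mem_add]
              right; omega
          | k1 + 1, k2 + 1 =>
            have := hpair k1 k2 (by simpa using h1) (by simpa using h2) (by omega)
            simp only [List.getElem_cons_succ, Nat.cast_add, Nat.cast_one] at this ⊢
            refine ⟨this.1, ?_, ?_⟩
            · intro heq; exact this.2.1 (by omega)
            · intro heq; exact this.2.2 (by omega)
        · intro k hk
          match k with
          | 0 =>
            simp only [List.getElem_cons_zero, Nat.cast_zero, add_zero]
            exact ⟨hc.1.1, hc.1.2, hc.2⟩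
          | k + 1 =>
            have hm := hmem k (by simpa using hk)
            simp only [PySem.Set.mem_add, not_or] at hm
            simp only [List.getElem_cons_succ, Nat.cast_add, Nat.cast_one]
            refine ⟨hm.1.1, ?_, ?_⟩
            · have := hm.2.1.1; convert this using 2; omega
            · have := hm.2.2.1; convert this using 2; omega
      · rintro ⟨hpair, hmem⟩
        constructor
        · intro k1 k2 h1 h2 hlt
          have := hpair (k1 + 1) (k2 + 1) (by simpa using h1) (by simpa using h2) (by omega)
          simp only [List.getElem_cons_succ, Nat.cast_add, Nat.cast_one] at this
          refine ⟨this.1, ?_, ?_⟩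
          · intro heq; exact this.2.1 (by omega)
          · intro heq; exact this.2.2 (by omega)
        · intro k hk
          have hm := hmem (k + 1) (by simpa using hk)
          have hp := hpair 0 (k + 1) (by simp) (by simpa using hk) (by omega)
          simp only [List.getElem_cons_zero, List.getElem_cons_succ, Nat.cast_zero, add_zero,
            Nat.cast_add, Nat.cast_one] at hm hp
          simp only [PySem.Set.mem_add, not_or]
          refine ⟨⟨hm.1, ?_⟩, ⟨?_, ?_⟩, ⟨?_, ?_⟩⟩
          · intro heq; exact hp.1 heq.symm
          · convert hm.2.1 using 2; omega
          · intro heq; apply hp.2.1; omega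
          · convert hm.2.2 using 2; omega
          · intro heq; apply hp.2.2; omega

lemma check_alt_iff (xs : List Int) : check_alt xs = true ↔ pvQ xs := by
  unfold check_alt
  rw [checkAltGo_iff]
  unfold pvQ
  constructor
  · rintro ⟨hpair, _⟩ k1 k2 h1 h2 hlt
    have := hpair k1 k2 h1 h2 hlt
    simpa using this
  · intro hQ
    refine ⟨fun k1 k2 h1 h2 hlt => ?_, fun k hk => ?_⟩
    · have := hQ k1 k2 h1 h2 hlt
      simpa using this
    · simp [PySem.Set.empty]

-- ===== VERDICT (by name: the statement is the Claim_ definition above) =====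
theorem check_spec : Claim_equal_check := by
  intro xs _
  unfold Spec_check
  rw [Bool.eq_iff_iff, check_iff, check_alt_iff]
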